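-- pv_equiv track=rewrite | github.com/apragsdale/demography | demography/integration.py | reorder_events
-- ===== SOURCE A (Python) =====
-- def reorder_events(new_events):
--     """
--     Place marginalize events at end of events
--     """
--     new_events_reordered = []
--     for event in new_events:
--         if event[0] != 'marginalize' and event[0] != 'pass':
--             new_events_reordered.append(event)
--     for event in new_events:
--         if event[0] == 'pass':
--             new_events_reordered.append(event)
--     for event in new_events:
--         if event[0] == 'marginalize':
--             new_events_reordered.append(event)
--     return new_events_reordered
-- ===== SOURCE B (Python) =====
-- def reorder_events(new_events):
--     """
--     Place marginalize events at end of events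
--     """
--     others = []
--     passes = []
--     marginalizes = []
--     for event in new_events:
--         if event[0] == 'pass':
--             passes.append(event)
--         elif event[0] == 'marginalize':
--             marginalizes.append(event)
--         else:
--             others.append(event)
--     return others + passes + marginalizes
-- ===== Notes on version B (the rewrite author's own statement) =====
-- stated objective: simpler
-- what changed: B makes a single pass over new_events, bucketing each event into one of three lists (others, passes, marginalizes) and concatenating them, instead of A's three separate passes over the whole list; Pre_ only excludes inputs containing an empty event, where both programs raise IndexError.
import Mathlib
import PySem

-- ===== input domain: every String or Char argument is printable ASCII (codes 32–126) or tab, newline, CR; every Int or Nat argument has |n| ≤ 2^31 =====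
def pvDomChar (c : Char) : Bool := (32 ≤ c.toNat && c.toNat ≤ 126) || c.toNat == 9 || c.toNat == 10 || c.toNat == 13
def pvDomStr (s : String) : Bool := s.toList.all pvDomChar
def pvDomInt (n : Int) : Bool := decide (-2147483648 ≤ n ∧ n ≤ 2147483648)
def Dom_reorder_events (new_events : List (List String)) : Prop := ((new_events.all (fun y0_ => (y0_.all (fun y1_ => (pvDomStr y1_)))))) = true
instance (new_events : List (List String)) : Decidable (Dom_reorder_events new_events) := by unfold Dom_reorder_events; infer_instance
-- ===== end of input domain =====

-- B is one pass with three buckets instead of A's three passes; equivalence of return values on events with nonempty entries (both raise on an empty event).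

-- ===== PORT A =====
-- event[0]: on Pre_ every event is nonempty, so pyGet? is some; getD "" is exact there
def pvHd (e : List String) : String := (PySem.List.pyGet? e 0).getD ""

def reorder_events (new_events : List (List String)) : List (List String) :=
  let r1 := new_events.foldl
    (fun acc event => if pvHd event ≠ "marginalize" ∧ pvHd event ≠ "pass" then acc ++ [event] else acc) []
  let r2 := new_events.foldl
    (fun acc event => if pvHd event = "pass" then acc ++ [event] else acc) r1
  new_events.foldl
    (fun acc event => if pvHd event = "marginalize" then acc ++ [event] else acc) r2

-- ===== PORT B =====
def pvBuckets (new_events : List (List String))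
    (acc : List (List String) × List (List String) × List (List String)) :
    List (List String) × List (List String) × List (List String) :=
  match new_events with
  | [] => acc
  | event :: rest =>
      if pvHd event = "pass" then pvBuckets rest (acc.1, acc.2.1 ++ [event], acc.2.2)
      else if pvHd event = "marginalize" then pvBuckets rest (acc.1, acc.2.1, acc.2.2 ++ [event])
      else pvBuckets rest (acc.1 ++ [event], acc.2.1, acc.2.2)

def reorder_events_alt (new_events : List (List String)) : List (List String) :=
  let b := pvBuckets new_events ([], [], [])
  b.1 ++ b.2.1 ++ b.2.2

-- ===== PRECONDITION & SPEC =====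
-- Pre_ excludes exactly the inputs containing an empty event, on which Python A (and B) raise IndexError at event[0]
def Pre_reorder_events (new_events : List (List String)) : Prop :=
  ∀ e ∈ new_events, e ≠ []
instance (new_events : List (List String)) : Decidable (Pre_reorder_events new_events) := by
  unfold Pre_reorder_events; infer_instance
def pvWitness_reorder_events : List (List String) := [["pass"], ["split", "2"], ["marginalize"]]

def Spec_reorder_events (new_events : List (List String)) (out : List (List String)) : Prop := out = reorder_events_alt new_events
instance (new_events : List (List String)) (out : List (List String)) : Decidable (Spec_reorder_events new_events out) := by unfold Spec_reorder_events; infer_instance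

-- ===== CLAIM (what is proved, stated in full; the proofs are below) =====
def Claim_equal_reorder_events : Prop := ∀ (new_events : List (List String)), Dom_reorder_events new_events → Pre_reorder_events new_events → Spec_reorder_events new_events (reorder_events new_events)

-- ===== LEMMAS AND PROOFS =====

lemma pvBuckets_spec (l : List (List String)) (o p m : List (List String)) :
    pvBuckets l (o, p, m) =
      (o ++ l.filter (fun e => !(pvHd e == "pass") && !(pvHd e == "marginalize")),
       p ++ l.filter (fun e => pvHd e == "pass"),
       m ++ l.filter (fun e => pvHd e == "marginalize")) := by
  induction l generalizing o p m with
  | nil => simp [pvBuckets]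
  | cons e rest ih =>
    simp only [pvBuckets, List.filter_cons]
    by_cases hp : pvHd e = "pass"
    · simp [hp, ih]
    · by_cases hm : pvHd e = "marginalize"
      · simp [hm, ih]
      · simp [hp, hm, ih]

lemma pvFoldl_if_filter (P : List String → Prop) [DecidablePred P]
    (l : List (List String)) (acc : List (List String)) :
    l.foldl (fun acc e => if P e then acc ++ [e] else acc) acc
      = acc ++ l.filter (fun e => decide (P e)) := by
  induction l generalizing acc with
  | nil => simp
  | cons e rest ih =>
    simp only [List.foldl_cons, List.filter_cons]
    by_cases h : P e
    · simp [h, ih]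
    · simp [h, ih]

-- ===== VERDICT (by name: the statement is the Claim_ definition above) =====
theorem reorder_events_spec : Claim_equal_reorder_events := by
  intro new_events _ _
  show _ = _
  simp only [reorder_events, reorder_events_alt, pvFoldl_if_filter, pvBuckets_spec,
    List.nil_append, List.append_assoc]
  congr 1
  apply List.filter_congr
  intro e _
  by_cases hp : pvHd e = "pass" <;> by_cases hm : pvHd e = "marginalize" <;> simp [hp, hm]
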